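-- pv_equiv track=rewrite | github.com/Michaszek224/praktykaiszeregowaniezadan | zadanie1/algorytmy2/155830.py | calculate_criterion
-- ===== SOURCE A (Python) =====
-- from typing import List, Dict, Tuple
--
-- def calculate_criterion(s: int, tasks: Dict[int, Dict[str, int]], batches: List[List[int]]) -> int:
--     total_tardiness = 0
--     current_time = 0
--
--     for batch in batches:
--         batch_time = sum(tasks[j]['p'] for j in batch)
--         completion_time = current_time + batch_time
--         current_time = completion_time + s
--         for j in batch:
--             tardiness = max(0,completion_time - tasks[j]['d'])
--             total_tardiness += tardiness
--
--     return total_tardiness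
-- ===== SOURCE B (Python) =====
-- def calculate_criterion(s, tasks, batches):
--     # Closed form for the clock: batch i finishes at
--     #   completion_i = i*s + sum of 'p' over all tasks in batches[0..i]
--     # so no running clock state is carried; every batch's tardiness is
--     # computed independently from the prefix of batches.
--     total = 0
--     for i, batch in enumerate(batches):
--         completion = i * s + sum(tasks[j]['p'] for pb in batches[:i + 1] for j in pb)
--         for j in batch:
--             total += max(0, completion - tasks[j]['d'])
--     return total
-- ===== Notes on version B (the rewrite author's own statement) =====
-- stated objective: alternative
-- what changed: Replaces A's running-clock state (current_time updated batch by batch) with a closed form: batch i's completion time is computed from scratch as i*s plus the processing-time sum over the prefix batches[:i+1], making each batch's tardiness independent of loop-carried state (at the cost of recomputing prefix sums, O(B^2) in the number of batches).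
import Mathlib
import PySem

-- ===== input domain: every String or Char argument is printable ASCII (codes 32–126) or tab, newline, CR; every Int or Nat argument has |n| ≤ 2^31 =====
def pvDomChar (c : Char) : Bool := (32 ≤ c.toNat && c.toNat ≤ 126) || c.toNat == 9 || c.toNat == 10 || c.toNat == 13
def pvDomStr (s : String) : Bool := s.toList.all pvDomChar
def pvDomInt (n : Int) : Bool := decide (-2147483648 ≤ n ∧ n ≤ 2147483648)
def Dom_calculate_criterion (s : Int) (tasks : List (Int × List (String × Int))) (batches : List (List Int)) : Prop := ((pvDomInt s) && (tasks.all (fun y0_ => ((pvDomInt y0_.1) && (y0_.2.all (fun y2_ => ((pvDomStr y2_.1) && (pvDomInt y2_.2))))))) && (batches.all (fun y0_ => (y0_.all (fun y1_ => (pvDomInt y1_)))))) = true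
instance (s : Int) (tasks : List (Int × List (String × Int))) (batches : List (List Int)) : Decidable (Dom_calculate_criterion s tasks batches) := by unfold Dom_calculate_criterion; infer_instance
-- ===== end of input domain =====

-- B replaces A's running clock with a closed form (completion of batch i = i*s + prefix
-- processing-time sum), recomputed per batch (objective: alternative). Equal values proved on Pre_.

-- ===== PORT A =====
-- tasks[j][k] with a 0 default; on Pre_ both levels of lookup succeed, so this equals Python's tasks[j][k]
def taskField (tasks : List (Int × List (String × Int))) (j : Int) (k : String) : Int :=
  (((tasks.lookup j).getD []).lookup k).getD 0

def calculate_criterion (s : Int) (tasks : List (Int × List (String × Int))) (batches : List (List Int)) : Int :=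
  (batches.foldl (fun (st : Int × Int) batch =>
      let batch_time := batch.foldl (fun a j => a + taskField tasks j "p") 0
      let completion_time := st.2 + batch_time
      (batch.foldl (fun t j => t + max 0 (completion_time - taskField tasks j "d")) st.1,
       completion_time + s))
    (0, 0)).1

-- ===== PORT B =====
-- enumerate(batches) ported as zipIdx (pairs are (batch, i)); the slice batches[:i+1]
-- is List.take (i+1), exact since the upper bound i+1 is nonnegative.
def calculate_criterion_alt (s : Int) (tasks : List (Int × List (String × Int))) (batches : List (List Int)) : Int :=
  (batches.zipIdx 0).foldl (fun total (p : List Int × Nat) =>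
      let completion := (p.2 : Int) * s +
        ((batches.take (p.2 + 1)).flatMap (fun pb => pb.map (fun j => taskField tasks j "p"))).sum
      p.1.foldl (fun t j => t + max 0 (completion - taskField tasks j "d")) total) 0

-- ===== PRECONDITION & SPEC =====
-- Pre_: Python A raises KeyError unless every task id in every batch is a key of tasks whose
-- record contains both 'p' and 'd'; exactly those inputs are admitted.
def Pre_calculate_criterion (s : Int) (tasks : List (Int × List (String × Int))) (batches : List (List Int)) : Prop :=
  (batches.all (fun batch => batch.all (fun j =>
    match tasks.lookup j with
    | some td => (td.lookup "p").isSome && (td.lookup "d").isSome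
    | none => false))) = true
instance (s : Int) (tasks : List (Int × List (String × Int))) (batches : List (List Int)) : Decidable (Pre_calculate_criterion s tasks batches) := by unfold Pre_calculate_criterion; infer_instance

def pvWitness_calculate_criterion : Int × (List (Int × List (String × Int))) × List (List Int) :=
  (2, [(1, [("p", 3), ("d", 2)]), (2, [("p", 1), ("d", 10)])], [[1], [2, 1]])

def Spec_calculate_criterion (s : Int) (tasks : List (Int × List (String × Int))) (batches : List (List Int)) (out : Int) : Prop := out = calculate_criterion_alt s tasks batches
instance (s : Int) (tasks : List (Int × List (String × Int))) (batches : List (List Int)) (out : Int) : Decidable (Spec_calculate_criterion s tasks batches out) := by unfold Spec_calculate_criterion; infer_instance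

-- ===== CLAIM (what is proved, stated in full; the proofs are below) =====
def Claim_equal_calculate_criterion : Prop := ∀ (s : Int) (tasks : List (Int × List (String × Int))) (batches : List (List Int)), Dom_calculate_criterion s tasks batches → Pre_calculate_criterion s tasks batches → Spec_calculate_criterion s tasks batches (calculate_criterion s tasks batches)

-- ===== LEMMAS AND PROOFS =====

-- the value both programs compute, recursively, with the clock as an explicit parameter
def tardSum (s : Int) (tasks : List (Int × List (String × Int))) (cur : Int) : List (List Int) → Int
  | [] => 0
  | b :: bs =>
    let c := cur + (b.map (fun j => taskField tasks j "p")).sum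
    b.foldl (fun t j => t + max 0 (c - taskField tasks j "d")) 0 + tardSum s tasks (c + s) bs

theorem foldl_add_shift (l : List Int) (f : Int → Int) (a : Int) :
    l.foldl (fun t j => t + f j) a = a + l.foldl (fun t j => t + f j) 0 := by
  induction l generalizing a with
  | nil => simp
  | cons x xs ih =>
    simp only [List.foldl_cons]
    rw [ih (a + f x), ih (0 + f x)]
    ring

theorem sum_map_eq_foldl (tasks : List (Int × List (String × Int))) (b : List Int) :
    (b.map (fun j => taskField tasks j "p")).sum
      = b.foldl (fun a j => a + taskField tasks j "p") 0 := by
  induction b with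
  | nil => simp
  | cons x xs ih =>
    simp only [List.map_cons, List.sum_cons, List.foldl_cons]
    rw [foldl_add_shift xs (fun j => taskField tasks j "p") (0 + taskField tasks x "p"), ← ih]
    ring

theorem foldA_eq_tardSum (s : Int) (tasks : List (Int × List (String × Int)))
    (bs : List (List Int)) (total cur : Int) :
    (bs.foldl (fun (st : Int × Int) batch =>
      let batch_time := batch.foldl (fun a j => a + taskField tasks j "p") 0
      let completion_time := st.2 + batch_time
      (batch.foldl (fun t j => t + max 0 (completion_time - taskField tasks j "d")) st.1,
       completion_time + s)) (total, cur)).1 = total + tardSum s tasks cur bs := by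
  induction bs generalizing total cur with
  | nil => simp [tardSum]
  | cons b bs ih =>
    simp only [List.foldl_cons, tardSum]
    rw [ih, foldl_add_shift b (fun j =>
      max 0 (cur + b.foldl (fun a j => a + taskField tasks j "p") 0 - taskField tasks j "d")) total,
      sum_map_eq_foldl]
    ring

-- processing-time sum of a list of batches
def sumP (tasks : List (Int × List (String × Int))) (bs : List (List Int)) : Int :=
  (bs.flatMap (fun pb => pb.map (fun j => taskField tasks j "p"))).sum

theorem foldB_eq_tardSum (s : Int) (tasks : List (Int × List (String × Int)))
    (bs : List (List Int)) : ∀ (pre : List (List Int)) (total : Int),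
    ((bs.zipIdx pre.length).foldl (fun total (p : List Int × Nat) =>
      let completion := (p.2 : Int) * s +
        (((pre ++ bs).take (p.2 + 1)).flatMap (fun pb => pb.map (fun j => taskField tasks j "p"))).sum
      p.1.foldl (fun t j => t + max 0 (completion - taskField tasks j "d")) total) total)
    = total + tardSum s tasks ((pre.length : Int) * s + sumP tasks pre) bs := by
  induction bs with
  | nil => intro pre total; simp [tardSum]
  | cons b bs ih =>
    intro pre total
    have htake : (pre ++ b :: bs).take (pre.length + 1) = pre ++ [b] := by
      rw [show pre.length + 1 = pre.length + 1 from rfl, List.take_append]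
      simp
    have hassoc : pre ++ b :: bs = (pre ++ [b]) ++ bs := by simp
    simp only [List.zipIdx_cons, List.foldl_cons]
    rw [htake]
    have hlen : pre.length + 1 = (pre ++ [b]).length := by simp
    rw [hassoc, hlen, ih (pre ++ [b])]
    rw [foldl_add_shift b (fun j =>
      max 0 ((pre.length : Int) * s +
        ((pre ++ [b]).flatMap (fun pb => pb.map (fun j => taskField tasks j "p"))).sum
        - taskField tasks j "d")) total]
    simp only [tardSum, sumP, List.flatMap_append, List.flatMap_cons, List.flatMap_nil,
      List.sum_append, List.append_nil, List.length_append, List.length_cons, List.length_nil]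
    push_cast
    ring_nf

-- ===== VERDICT (by name: the statement is the Claim_ definition above) =====
theorem calculate_criterion_spec : Claim_equal_calculate_criterion := by
  intro s tasks batches _ _
  unfold Spec_calculate_criterion calculate_criterion calculate_criterion_alt
  rw [foldA_eq_tardSum]
  have h := foldB_eq_tardSum s tasks batches [] 0
  simp only [List.length_nil, List.nil_append, sumP, List.flatMap_nil, List.sum_nil] at h
  rw [h]
  simp
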